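-- pv_equiv track=rewrite | github.com/RandFa/Bioinformatics | antibiotics.py | SpectralConvolution
-- ===== SOURCE A (Python) =====
-- def SpectralConvolution(Spectrum):
--     """
--     Input: A collection of integers Spectrum.
--     Output: The list of elements in the convolution of Spectrum. If an element has multiplicity k, it should appear exactly k times; you may return the elements in any order.
--     """
--     finalspec = []
--     spec = Spectrum[:]
--     for e in spec:
--         for i in Spectrum:
--             a = e - i
--             if a > 0:
--                 finalspec.append(a)
--     finalspec.sort(reverse = True)
--     return finalspec
-- ===== SOURCE B (Python) =====
-- def SpectralConvolution(Spectrum):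
--     # Count multiplicities of each distinct mass, then walk ordered pairs of the
--     # sorted distinct values only: each pair (x, y) with y < x contributes the
--     # difference x - y with multiplicity cnt[x] * cnt[y].
--     cnt = {}
--     for x in Spectrum:
--         cnt[x] = cnt.get(x, 0) + 1
--     vals = sorted(cnt)
--     diffs = {}
--     for idx, x in enumerate(vals):
--         for y in vals[:idx]:
--             d = x - y
--             diffs[d] = diffs.get(d, 0) + cnt[x] * cnt[y]
--     out = []
--     for d in sorted(diffs, reverse=True):
--         out += [d] * diffs[d]
--     return out
-- ===== Notes on version B (the rewrite author's own statement) =====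
-- stated objective: faster
-- what changed: B never enumerates raw spectrum pairs: it builds a multiplicity counter of the distinct masses, walks only ordered pairs (x,y) of the ascending-sorted distinct values (y strictly before x, so no positivity test), accumulates each difference x-y with weight cnt[x]*cnt[y] in a dictionary, and emits the result by expanding the descending-sorted distinct differences by their multiplicities, instead of flat-appending all n^2 differences and comparison-sorting them.
import Mathlib
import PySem

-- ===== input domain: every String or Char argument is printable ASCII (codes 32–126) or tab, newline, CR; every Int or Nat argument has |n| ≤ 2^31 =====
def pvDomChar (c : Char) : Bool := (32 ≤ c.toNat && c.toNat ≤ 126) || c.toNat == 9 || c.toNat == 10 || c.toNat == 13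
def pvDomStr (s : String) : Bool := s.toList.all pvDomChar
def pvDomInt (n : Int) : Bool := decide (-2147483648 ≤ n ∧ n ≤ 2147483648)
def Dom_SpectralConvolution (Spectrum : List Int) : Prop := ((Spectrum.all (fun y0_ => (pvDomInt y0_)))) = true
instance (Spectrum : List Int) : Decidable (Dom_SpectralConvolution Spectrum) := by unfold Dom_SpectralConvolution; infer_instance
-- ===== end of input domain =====

-- B counts multiplicities of the distinct masses, accumulates each difference x - y over
-- ordered pairs of the ascending-sorted distinct values with weight cnt[x]*cnt[y] in a
-- dictionary, and expands the descending-sorted distinct differences by multiplicity,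
-- instead of flat-appending all pairwise differences and comparison-sorting them.


-- ===== PORT A =====
def SpectralConvolution (Spectrum : List Int) : List Int :=
  let spec := Spectrum
  let finalspec := spec.foldl (fun finalspec e =>
    Spectrum.foldl (fun finalspec i =>
      let a := e - i
      if a > 0 then finalspec ++ [a] else finalspec) finalspec) []
  PySem.List.sorted finalspec (fun x => x) true

-- ===== PORT B =====
def SpectralConvolution_alt (Spectrum : List Int) : List Int :=
  let cnt := Spectrum.foldl (fun cnt x => cnt.insert x (cnt.getD x 0 + 1))
    (PySem.Dict.empty : PySem.Dict Int Int)
  let vals := PySem.List.sorted cnt.keys (fun x => x) false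
  let diffs := (PySem.List.enumerate vals).foldl (fun diffs p =>
    (PySem.List.slice vals none (some p.1)).foldl (fun (diffs : PySem.Dict Int Int) y =>
      let d := p.2 - y
      diffs.insert d (diffs.getD d 0 + cnt.getD p.2 0 * cnt.getD y 0)) diffs)
    (PySem.Dict.empty : PySem.Dict Int Int)
  (PySem.List.sorted diffs.keys (fun x => x) true).foldl
    (fun out d => out ++ List.replicate (diffs.getD d 0).toNat d) []

-- ===== PRECONDITION & SPEC =====
def Spec_SpectralConvolution (Spectrum : List Int) (out : List Int) : Prop := out = SpectralConvolution_alt Spectrum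
instance (Spectrum : List Int) (out : List Int) : Decidable (Spec_SpectralConvolution Spectrum out) := by unfold Spec_SpectralConvolution; infer_instance

-- ===== CLAIM (what is proved, stated in full; the proofs are below) =====
def Claim_equal_SpectralConvolution : Prop := ∀ (Spectrum : List Int), Dom_SpectralConvolution Spectrum → Spec_SpectralConvolution Spectrum (SpectralConvolution Spectrum)

-- ===== LEMMAS AND PROOFS =====

-- the flat list of positive pairwise differences, in A's generation order
def pvDiffs (S : List Int) : List Int :=
  S.flatMap (fun e => (S.filter (fun i => decide (e - i > 0))).map (fun i => e - i))

lemma A_eq_sorted_diffs (S : List Int) :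
    SpectralConvolution S = PySem.List.sorted (pvDiffs S) (fun x => x) true := by
  unfold SpectralConvolution pvDiffs
  refine congrArg (fun l => PySem.List.sorted l (fun x => x) true) ?_
  have h : ∀ (acc : List Int), ∀ e ∈ S,
      S.foldl (fun acc i => if e - i > 0 then acc ++ [e - i] else acc) acc
      = acc ++ (S.filter (fun i => decide (e - i > 0))).map (fun i => e - i) := by
    intro acc e _
    have := PySem.List.foldl_append_if (fun i => decide (e - i > 0)) (fun i => e - i) S acc
    simpa using this
  rw [PySem.List.foldl_congr_mem S _ _ [] h]
  simpa using PySem.List.foldl_append_eq_flatMap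
    (fun e => (S.filter (fun i => decide (e - i > 0))).map (fun i => e - i)) S []

-- the sorted distinct masses, the ordered pairs (later, earlier), the pair weight
def pvVals (S : List Int) : List Int :=
  PySem.List.sorted (PySem.Set.ofList S) (fun x => x) false

def pvPairs (V : List Int) : List (Int × Int) :=
  (PySem.List.enumerate V).flatMap (fun p => (V.take p.1.toNat).map (fun y => (p.2, y)))

def pvW (S : List Int) (q : Int × Int) : Int := (S.count q.1 : Int) * (S.count q.2 : Int)

def pvDict (S : List Int) : PySem.Dict Int Int :=
  (pvPairs (pvVals S)).foldl
    (fun d q => d.insert (q.1 - q.2) (d.getD (q.1 - q.2) 0 + pvW S q)) PySem.Dict.empty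

lemma B_eq_dict (S : List Int) :
    SpectralConvolution_alt S =
      (PySem.List.sorted (pvDict S).keys (fun x => x) true).foldl
        (fun out d => out ++ List.replicate ((pvDict S).getD d 0).toNat d) [] := by
  unfold SpectralConvolution_alt
  rw [PySem.Dict.foldl_insert_getD_add_one_eq_counter]
  simp only [PySem.Dict.keys_counter, PySem.Dict.getD_counter]
  have hdict :
      (PySem.List.enumerate (PySem.List.sorted (PySem.Set.ofList S) (fun x => x) false)).foldl (fun diffs p =>
        (PySem.List.slice (PySem.List.sorted (PySem.Set.ofList S) (fun x => x) false) none (some p.1)).foldl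
          (fun (diffs : PySem.Dict Int Int) y =>
            diffs.insert (p.2 - y)
              (diffs.getD (p.2 - y) 0 + (S.count p.2 : Int) * (S.count y : Int))) diffs)
        PySem.Dict.empty = pvDict S := by
    unfold pvDict pvPairs pvVals pvW
    rw [List.foldl_flatMap]
    apply PySem.List.foldl_congr_mem
    intro d p hp
    rcases (PySem.List.mem_enumerate_iff _ _ _).mp hp with ⟨k, hk, rfl⟩
    simp only [List.foldl_map, PySem.List.slice_to_natCast, zero_add, Int.toNat_natCast]
  rw [hdict]

-- getD of a weighted accumulation fold: prior value plus the sum of matching weights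
lemma getD_wfold (w : Int × Int → Int) :
    ∀ (L : List (Int × Int)) (d : PySem.Dict Int Int) (v : Int),
      (L.foldl (fun d q => d.insert (q.1 - q.2) (d.getD (q.1 - q.2) 0 + w q)) d).getD v 0
        = d.getD v 0 + ((L.filter (fun q => q.1 - q.2 == v)).map w).sum := by
  intro L
  induction L with
  | nil => intro d v; simp
  | cons q t ih =>
    intro d v
    by_cases hq : q.1 - q.2 = v
    · simp [ih, List.filter_cons, hq, PySem.Dict.getD_insert]
      ring
    · simp [ih, List.filter_cons, hq, PySem.Dict.getD_insert, Ne.symm hq]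

lemma keys_pvDict (S : List Int) :
    (pvDict S).keys = PySem.Set.ofList ((pvPairs (pvVals S)).map (fun q => q.1 - q.2)) := by
  unfold pvDict
  rw [PySem.Dict.keys_foldl_insert_key]
  simp [PySem.Dict.keys_empty]
  rfl

lemma getD_pvDict (S : List Int) (v : Int) :
    (pvDict S).getD v 0
      = (((pvPairs (pvVals S)).filter (fun q => q.1 - q.2 == v)).map (pvW S)).sum := by
  unfold pvDict
  rw [getD_wfold]
  simp

lemma nodup_pvVals (S : List Int) : (pvVals S).Nodup :=
  (PySem.List.sorted_perm (PySem.Set.ofList S) (fun x => x) false).symm.nodup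
    (PySem.Set.nodup_ofList S)

lemma lt_pvVals (S : List Int) : (pvVals S).Pairwise (· < ·) :=
  PySem.List.sorted_ofList_pairwise_lt S

lemma mem_pvVals (S : List Int) (x : Int) : x ∈ pvVals S ↔ x ∈ S := by
  unfold pvVals
  rw [PySem.List.mem_sorted]
  exact PySem.Set.mem_ofList S x

-- in a strictly increasing list, the prefix before position k is exactly the elements below V[k]
lemma mem_take_iff_lt (V : List Int) (hV : V.Pairwise (· < ·)) (k : Nat) (hk : k < V.length)
    (z : Int) : z ∈ V.take k ↔ z ∈ V ∧ z < V[k] := by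
  constructor
  · intro hz
    rcases List.mem_iff_getElem.mp hz with ⟨j, hj, rfl⟩
    have hjk : j < k := by
      have := hj; simp [List.length_take] at this; omega
    have hj' : j < V.length := lt_of_lt_of_le (lt_of_lt_of_le hjk (le_of_lt hk)) (le_refl _)
    have hget : (V.take k)[j] = V[j] := List.getElem_take
    rw [hget]
    exact ⟨List.getElem_mem hj', List.pairwise_iff_getElem.mp hV j k hj' hk hjk⟩
  · rintro ⟨hz, hlt⟩
    rcases List.mem_iff_getElem.mp hz with ⟨j, hj, rfl⟩
    have hjk : j < k := by
      by_contra hge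
      push_neg at hge
      rcases eq_or_lt_of_le hge with heq | hkj
      · subst heq; exact lt_irrefl _ hlt
      · have := List.pairwise_iff_getElem.mp hV k j hk hj hkj
        omega
    have hj2 : j < (V.take k).length := by simp [List.length_take]; omega
    have hget : (V.take k)[j] = V[j] := List.getElem_take
    rw [← hget]
    exact List.getElem_mem hj2

lemma mem_pvPairs (V : List Int) (q : Int × Int) :
    q ∈ pvPairs V ↔ ∃ (k : Nat) (_ : k < V.length), q.1 = V[k] ∧ q.2 ∈ V.take k := by
  unfold pvPairs
  rw [List.mem_flatMap]
  constructor
  · rintro ⟨p, hp, hq⟩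
    rcases (PySem.List.mem_enumerate_iff _ _ _).mp hp with ⟨k, hk, rfl⟩
    rcases List.mem_map.mp hq with ⟨y, hy, rfl⟩
    exact ⟨k, hk, rfl, by simpa using hy⟩
  · rintro ⟨k, hk, h1, h2⟩
    refine ⟨((k : Int), V[k]), ?_, ?_⟩
    · exact (PySem.List.mem_enumerate_iff _ _ _).mpr ⟨k, hk, by simp⟩
    · refine List.mem_map.mpr ⟨q.2, by simpa using h2, ?_⟩
      simp [← h1]

lemma count_flatMap_sum (L : List Int) (f : Int → List Int) (v : Int) :
    (L.flatMap f).count v = (L.map (fun e => (f e).count v)).sum := by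
  induction L with
  | nil => simp
  | cons e t ih => simp [List.count_append, ih]

lemma count_inner (S : List Int) (e v : Int) :
    ((S.filter (fun i => decide (e - i > 0))).map (fun i => e - i)).count v
      = if v > 0 then S.count (e - v) else 0 := by
  rw [List.count_eq_countP, List.countP_map, List.countP_filter]
  by_cases hv : v > 0
  · rw [List.count_eq_countP]
    simp only [hv, if_true]
    apply List.countP_congr
    intro i _
    by_cases h : i = e - v <;> simp [h, Function.comp] <;> omega
  · simp only [hv, if_false]
    rw [List.countP_eq_zero]
    intro i _
    simp [Function.comp]
    omega

lemma cast_sum_nat (l : List Nat) : ((l.sum : Nat) : Int) = (l.map (fun (n : Nat) => (n : Int))).sum := by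
  induction l with
  | nil => simp
  | cons a t ih => simp [ih]

lemma count_pvDiffs (S : List Int) (v : Int) :
    ((pvDiffs S).count v : Int)
      = if v > 0 then (S.map (fun e => (S.count (e - v) : Int))).sum else 0 := by
  unfold pvDiffs
  rw [count_flatMap_sum, cast_sum_nat, List.map_map]
  by_cases hv : v > 0
  · simp only [hv, if_true]
    congr 1
    apply List.map_congr_left
    intro e _
    simp only [Function.comp_apply, count_inner, hv, if_true]
  · simp only [hv, if_false]
    apply List.sum_eq_zero
    intro x hx
    rcases List.mem_map.mp hx with ⟨e, _, rfl⟩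
    simp only [Function.comp_apply, count_inner, hv, if_false, Nat.cast_zero]

lemma sum_map_add_int' (l : List Int) (f g : Int → Int) :
    (l.map (fun x => f x + g x)).sum = (l.map f).sum + (l.map g).sum := by
  induction l with
  | nil => simp
  | cons a t ih => simp [ih]; ring

lemma sum_ite_mem (f : Int → Int) :
    ∀ (K : List Int), K.Nodup → ∀ e ∈ K,
      (K.map (fun x => if x = e then f x else 0)).sum = f e := by
  intro K
  induction K with
  | nil => intro _ e he; simp at he
  | cons a t ih =>
    intro hnd e he
    rcases List.nodup_cons.mp hnd with ⟨ha, hnt⟩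
    rcases List.mem_cons.mp he with rfl | het
    · have hz : (t.map (fun x => if x = e then f x else 0)).sum = 0 := by
        apply List.sum_eq_zero
        intro x hx
        rcases List.mem_map.mp hx with ⟨y, hy, rfl⟩
        have : y ≠ e := fun h => ha (h ▸ hy)
        simp [this]
      simp [hz]
    · have hne : a ≠ e := fun h => ha (h ▸ het)
      simp [hne, ih hnt e het]

lemma group_sum (f : Int → Int) (K : List Int) (hK : K.Nodup) :
    ∀ (S : List Int), (∀ e ∈ S, e ∈ K) →
      (S.map f).sum = (K.map (fun x => (S.count x : Int) * f x)).sum := by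
  intro S
  induction S with
  | nil =>
    intro _
    symm
    apply List.sum_eq_zero
    intro x hx
    rcases List.mem_map.mp hx with ⟨y, _, rfl⟩
    simp
  | cons e t ih =>
    intro hsub
    have he : e ∈ K := hsub e List.mem_cons_self
    have ht : ∀ x ∈ t, x ∈ K := fun x hx => hsub x (List.mem_cons_of_mem e hx)
    have hcnt : ∀ x, ((e :: t).count x : Int) = (t.count x : Int) + (if x = e then 1 else 0) := by
      intro x
      rw [List.count_cons]
      by_cases h : e = x <;> simp [h] <;> first | rfl | (exact fun hh => absurd hh.symm h) | push_cast <;> simp [h]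
    have : (K.map (fun x => ((e :: t).count x : Int) * f x)).sum
        = (K.map (fun x => (t.count x : Int) * f x + (if x = e then f x else 0))).sum := by
      apply congrArg
      apply List.map_congr_left
      intro x _
      rw [hcnt x]
      by_cases h : x = e <;> simp [h] <;> ring
    rw [this, sum_map_add_int' K (fun x => (t.count x : Int) * f x) (fun x => if x = e then f x else 0)]
    simp only [List.map_cons, List.sum_cons]
    rw [ih ht, sum_ite_mem f K hK e he]
    ring

lemma sum_map_filter_flatMap {α : Type} (L : List α) (f : α → List (Int × Int))
    (p : Int × Int → Bool) (g : Int × Int → Int) :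
    (((L.flatMap f).filter p).map g).sum
      = (L.map (fun a => (((f a).filter p).map g).sum)).sum := by
  induction L with
  | nil => simp
  | cons a t ih => simp [List.filter_append, ih]

lemma inner_pair_sum (S : List Int) (k : Nat) (hk : k < (pvVals S).length) (v : Int) :
    (((((pvVals S).take k).map (fun y => ((pvVals S)[k], y))).filter
        (fun q => q.1 - q.2 == v)).map (pvW S)).sum
      = if v > 0 then (S.count (pvVals S)[k] : Int) * (S.count ((pvVals S)[k] - v) : Int) else 0 := by
  set V := pvVals S with hV
  set x := V[k] with hx
  rw [List.filter_map, List.map_map]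
  have hpred : ∀ y ∈ V.take k, ((fun q => q.1 - q.2 == v) ∘ (fun y => (x, y))) y = (y == x - v) := by
    intro y _
    by_cases h : y = x - v <;> simp [h, Function.comp] <;> omega
  rw [List.filter_congr hpred, List.filter_beq, List.map_replicate, List.sum_replicate_int]
  have hnd : (V.take k).Nodup := (nodup_pvVals S).sublist (List.take_sublist k V)
  by_cases hmem : x - v ∈ V.take k
  · have h1 : (V.take k).count (x - v) = 1 := List.count_eq_one_of_mem hnd hmem
    have hvpos : v > 0 := by
      have := (mem_take_iff_lt V (lt_pvVals S) k hk (x - v)).mp hmem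
      omega
    rw [h1]
    simp only [hvpos, if_true, one_smul, one_mul]
    simp [pvW, Function.comp]
  · have h0 : (V.take k).count (x - v) = 0 := List.count_eq_zero.mpr hmem
    rw [h0]
    by_cases hvpos : v > 0
    · have hnv : x - v ∉ V := by
        intro hin
        exact hmem ((mem_take_iff_lt V (lt_pvVals S) k hk (x - v)).mpr ⟨hin, by omega⟩)
      have : S.count (x - v) = 0 := List.count_eq_zero.mpr (fun h => hnv ((mem_pvVals S _).mpr h))
      simp [hvpos, this]
    · simp [hvpos]

lemma pairs_sum (S : List Int) (v : Int) :
    (((pvPairs (pvVals S)).filter (fun q => q.1 - q.2 == v)).map (pvW S)).sum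
      = if v > 0 then ((pvVals S).map (fun x => (S.count x : Int) * (S.count (x - v) : Int))).sum
        else 0 := by
  unfold pvPairs
  rw [sum_map_filter_flatMap]
  have hcong : ∀ p ∈ PySem.List.enumerate (pvVals S),
      (fun p : Int × Int => (((((pvVals S).take p.1.toNat).map (fun y => (p.2, y))).filter
          (fun q => q.1 - q.2 == v)).map (pvW S)).sum) p
        = (fun p : Int × Int => if v > 0 then (S.count p.2 : Int) * (S.count (p.2 - v) : Int) else 0) p := by
    intro p hp
    rcases (PySem.List.mem_enumerate_iff _ _ _).mp hp with ⟨k, hk, rfl⟩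
    simp only [zero_add, Int.toNat_natCast]
    exact inner_pair_sum S k hk v
  rw [List.map_congr_left hcong]
  have : (PySem.List.enumerate (pvVals S)).map
        (fun p : Int × Int => if v > 0 then (S.count p.2 : Int) * (S.count (p.2 - v) : Int) else 0)
      = (pvVals S).map (fun x => if v > 0 then (S.count x : Int) * (S.count (x - v) : Int) else 0) := by
    conv_rhs => rw [← PySem.List.map_snd_enumerate (pvVals S) 0]
    rw [List.map_map]
    rfl
  rw [this]
  by_cases hv : v > 0
  · simp only [hv, if_true]
  · simp only [hv, if_false]
    exact List.sum_eq_zero (by intro x hx; rcases List.mem_map.mp hx with ⟨y, _, rfl⟩; rfl)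

lemma getD_pvDict_eq_count (S : List Int) (v : Int) :
    (pvDict S).getD v 0 = ((pvDiffs S).count v : Int) := by
  rw [getD_pvDict, pairs_sum, count_pvDiffs]
  by_cases hv : v > 0
  · simp only [hv, if_true]
    exact (group_sum (fun e => (S.count (e - v) : Int)) (pvVals S) (nodup_pvVals S) S
      (fun e he => (mem_pvVals S e).mpr he)).symm ▸ rfl
  · simp [hv]

lemma mem_pvDiffs (S : List Int) (v : Int) :
    v ∈ pvDiffs S ↔ ∃ e ∈ S, ∃ i ∈ S, e - i = v ∧ 0 < v := by
  unfold pvDiffs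
  simp only [List.mem_flatMap, List.mem_map, List.mem_filter]
  constructor
  · rintro ⟨e, he, i, ⟨hi, hpos⟩, rfl⟩
    exact ⟨e, he, i, hi, rfl, by simpa using hpos⟩
  · rintro ⟨e, he, i, hi, rfl, hpos⟩
    exact ⟨e, he, i, ⟨hi, by simpa using hpos⟩, rfl⟩

lemma mem_keys_pvDict (S : List Int) (v : Int) :
    v ∈ (pvDict S).keys ↔ v ∈ pvDiffs S := by
  rw [keys_pvDict, PySem.Set.mem_ofList, List.mem_map, mem_pvDiffs]
  constructor
  · rintro ⟨q, hq, rfl⟩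
    rcases (mem_pvPairs _ q).mp hq with ⟨k, hk, h1, h2⟩
    rcases (mem_take_iff_lt _ (lt_pvVals S) k hk q.2).mp h2 with ⟨hq2, hlt⟩
    refine ⟨q.1, (mem_pvVals S q.1).mp (h1 ▸ List.getElem_mem hk), q.2,
      (mem_pvVals S q.2).mp hq2, rfl, by omega⟩
  · rintro ⟨e, he, i, hi, rfl, hpos⟩
    have heV : e ∈ pvVals S := (mem_pvVals S e).mpr he
    have hiV : i ∈ pvVals S := (mem_pvVals S i).mpr hi
    rcases List.mem_iff_getElem.mp heV with ⟨k, hk, rfl⟩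
    refine ⟨((pvVals S)[k], i), (mem_pvPairs _ _).mpr ⟨k, hk, rfl, ?_⟩, rfl⟩
    exact (mem_take_iff_lt _ (lt_pvVals S) k hk i).mpr ⟨hiV, by omega⟩

lemma nodup_keys_pvDict (S : List Int) : (pvDict S).keys.Nodup := by
  unfold pvDict
  exact PySem.Dict.nodup_keys_foldl_insert_key (pvPairs (pvVals S)) (fun q => q.1 - q.2)
    (fun d q => d.getD (q.1 - q.2) 0 + pvW S q) PySem.Dict.empty
    (by simp [PySem.Dict.nodup_keys_empty])

lemma count_expand (m : Int → Nat) :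
    ∀ (ks : List Int), ks.Nodup → ∀ (a : Int),
      (ks.flatMap (fun k => List.replicate (m k) k)).count a = if a ∈ ks then m a else 0 := by
  intro ks
  induction ks with
  | nil => intro _ a; simp
  | cons k t ih =>
    intro hnd a
    rcases List.nodup_cons.mp hnd with ⟨hk, hnt⟩
    by_cases hak : a = k
    · subst hak
      have : a ∉ t := hk
      simp [List.count_append, ih hnt, this]
    · simp [List.count_append, List.count_replicate, ih hnt, hak, Ne.symm hak]

lemma pairwise_expand (m : Int → Nat) :
    ∀ (ks : List Int), ks.Pairwise (fun a b => b ≤ a) →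
      (ks.flatMap (fun k => List.replicate (m k) k)).Pairwise (fun a b => b ≤ a) := by
  intro ks
  induction ks with
  | nil => intro _; simp
  | cons k t ih =>
    intro hp
    rcases List.pairwise_cons.mp hp with ⟨hk, ht⟩
    simp only [List.flatMap_cons]
    apply List.pairwise_append.mpr
    refine ⟨List.pairwise_replicate.mpr (Or.inr le_rfl), ih ht, ?_⟩
    intro x hx y hy
    rcases List.mem_flatMap.mp hy with ⟨kk, hkk, hyk⟩
    have hx2 := List.eq_of_mem_replicate hx
    have hy2 := List.eq_of_mem_replicate hyk
    rw [hx2, hy2]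
    exact hk kk hkk

theorem SpectralConvolution_spec : Claim_equal_SpectralConvolution := by
  intro S _
  unfold Spec_SpectralConvolution
  rw [A_eq_sorted_diffs S, B_eq_dict S]
  have hexp : (PySem.List.sorted (pvDict S).keys (fun x => x) true).foldl
        (fun out d => out ++ List.replicate ((pvDict S).getD d 0).toNat d) []
      = (PySem.List.sorted (pvDict S).keys (fun x => x) true).flatMap
          (fun k => List.replicate ((pvDiffs S).count k) k) := by
    rw [PySem.List.foldl_append_eq_flatMap
      (fun d => List.replicate ((pvDict S).getD d 0).toNat d) _ []]
    simp only [List.nil_append]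
    apply List.flatMap_congr
    intro k _
    rw [getD_pvDict_eq_count, Int.toNat_natCast]
  rw [hexp]
  set flat := pvDiffs S with hflat
  set ks := PySem.List.sorted (pvDict S).keys (fun x => x) true with hks
  set ys := ks.flatMap (fun k => List.replicate (flat.count k) k) with hys
  have hknd : ks.Nodup :=
    (PySem.List.sorted_perm (pvDict S).keys (fun x => x) true).symm.nodup (nodup_keys_pvDict S)
  have hkmem : ∀ a, a ∈ ks ↔ a ∈ flat := by
    intro a
    rw [hks, PySem.List.mem_sorted]
    exact mem_keys_pvDict S a
  have hperm : ys.Perm flat := by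
    apply List.perm_iff_count.mpr
    intro a
    rw [hys, count_expand (fun k => flat.count k) ks hknd a]
    by_cases ha : a ∈ flat
    · simp [(hkmem a).mpr ha]
    · have : a ∉ ks := fun h => ha ((hkmem a).mp h)
      simp [this, List.count_eq_zero.mpr ha]
  have hpw : ys.Pairwise (fun a b => b ≤ a) := by
    apply pairwise_expand
    have := PySem.List.sorted_pairwise_rev (pvDict S).keys (fun x => x)
    simpa [hks] using this
  have hpwA : (PySem.List.sorted flat (fun x => x) true).Pairwise (fun a b => b ≤ a) := by
    have := PySem.List.sorted_pairwise_rev flat (fun x => x)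
    simpa using this
  exact List.Perm.eq_of_pairwise (fun a b _ _ h1 h2 => le_antisymm h2 h1) hpwA hpw
    ((PySem.List.sorted_perm flat (fun x => x) true).trans hperm.symm)
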